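-- pv_equiv track=rewrite | github.com/bartoszblachucki/GitNotionChangelogger | builder.py | get_issues_for_ids
-- ===== SOURCE A (Python) =====
-- def get_issues_for_ids(issues, issue_ids):
--     found = []
--     for _id in issue_ids:
--         for issue in issues:
--             issue_id, issue_url = issue
--             if issue_id == _id:
--                 found.append(issue)
--
--     return found
-- ===== SOURCE B (Python) =====
-- def get_issues_for_ids(issues, issue_ids):
--     index = {}
--     for issue in issues:
--         index.setdefault(issue[0], []).append(issue)
--     found = []
--     for _id in issue_ids:
--         found.extend(index.get(_id, []))
--     return found
-- ===== Notes on version B (the rewrite author's own statement) =====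
-- stated objective: faster
-- what changed: Replaced the inner scan over all issues for every requested id by a dict-of-lists index built once over issues, so each id is answered by one hash lookup.
import Mathlib
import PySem

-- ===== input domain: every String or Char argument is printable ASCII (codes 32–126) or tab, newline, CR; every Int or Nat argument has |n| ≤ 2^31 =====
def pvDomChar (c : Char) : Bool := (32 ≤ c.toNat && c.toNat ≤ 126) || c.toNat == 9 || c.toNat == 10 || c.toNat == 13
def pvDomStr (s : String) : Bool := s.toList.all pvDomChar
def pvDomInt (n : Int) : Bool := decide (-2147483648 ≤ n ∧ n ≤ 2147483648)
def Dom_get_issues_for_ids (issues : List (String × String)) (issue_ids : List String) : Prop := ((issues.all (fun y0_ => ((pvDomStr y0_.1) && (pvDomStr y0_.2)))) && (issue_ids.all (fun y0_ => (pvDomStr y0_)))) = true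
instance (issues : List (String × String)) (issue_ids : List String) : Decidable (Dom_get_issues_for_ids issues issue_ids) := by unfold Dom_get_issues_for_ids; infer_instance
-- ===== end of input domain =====

-- B replaces A's per-id scan over all issues with a dict-of-lists index built once (objective: faster, measured asymptotic speed-up).


-- ===== PORT A =====
def get_issues_for_ids (issues : List (String × String)) (issue_ids : List String) : List (String × String) :=
  issue_ids.foldl (fun found _id =>
    issues.foldl (fun found issue =>
      if issue.1 == _id then found ++ [issue] else found) found) []

-- ===== PORT B =====
-- B builds a dict-of-lists index over issues once, then answers each id by one lookup.
def get_issues_for_ids_alt (issues : List (String × String)) (issue_ids : List String) : List (String × String) :=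
  let index : PySem.Dict String (List (String × String)) :=
    issues.foldl (fun d issue => d.modify issue.1 [] (fun l => l ++ [issue])) PySem.Dict.empty
  issue_ids.foldl (fun found _id => found ++ index.getD _id []) []

-- ===== PRECONDITION & SPEC =====
def Spec_get_issues_for_ids (issues : List (String × String)) (issue_ids : List String) (out : List (String × String)) : Prop := out = get_issues_for_ids_alt issues issue_ids
instance (issues : List (String × String)) (issue_ids : List String) (out : List (String × String)) : Decidable (Spec_get_issues_for_ids issues issue_ids out) := by unfold Spec_get_issues_for_ids; infer_instance

-- ===== CLAIM (what is proved, stated in full; the proofs are below) =====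
def Claim_equal_get_issues_for_ids : Prop := ∀ (issues : List (String × String)) (issue_ids : List String), Dom_get_issues_for_ids issues issue_ids → Spec_get_issues_for_ids issues issue_ids (get_issues_for_ids issues issue_ids)

-- ===== LEMMAS AND PROOFS =====

-- ===== VERDICT (by name: the statement is the Claim_ definition above) =====
-- the index's entry for k is exactly the matching issues, in order
theorem pv_index_getD (issues : List (String × String))
    (d : PySem.Dict String (List (String × String))) (k : String) :
    (issues.foldl (fun d issue => d.modify issue.1 [] (fun l => l ++ [issue])) d).getD k []
      = d.getD k [] ++ issues.filter (fun i => i.1 == k) := by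
  induction issues generalizing d with
  | nil => simp
  | cons a rest ih =>
    simp only [List.foldl_cons, ih, PySem.Dict.getD_modify, List.filter_cons]
    by_cases h : a.1 = k
    · simp [h]
    · simp [h, Ne.symm h]

theorem get_issues_for_ids_spec : Claim_equal_get_issues_for_ids := by
  intro issues issue_ids _
  show get_issues_for_ids issues issue_ids = get_issues_for_ids_alt issues issue_ids
  unfold get_issues_for_ids get_issues_for_ids_alt
  refine PySem.List.foldl_congr_mem _ _ _ _ (fun acc x _ => ?_)
  rw [PySem.List.foldl_append_if_eq_filter, pv_index_getD, PySem.Dict.getD_empty,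
    List.nil_append]
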